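-- pv_equiv track=rewrite | github.com/thomazcabral/IP | Lista5/q6.py | executar_caida
-- ===== SOURCE A (Python) =====
-- def cair(matriz):
--     linhas, colunas = len(matriz), len(matriz[0])
--     nova_matriz = [list(linha) for linha in matriz]  # Cria uma nova matriz baseada na matriz original
--     for i in range(linhas - 1, 0, -1):
--         for j in range(colunas):
--             if nova_matriz[i][j] not in ["X", "H"] and nova_matriz[i - 1][j] in ["X", "H"]:
--                 nova_matriz[i][j] = nova_matriz[i - 1][j]
--                 nova_matriz[i - 1][j] = "O"
--     return nova_matriz
--
-- def executar_caida(matriz):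
--     while True:
--         copia_matriz = [linha[:] for linha in matriz]
--         nova_matriz = cair(copia_matriz)
--         if nova_matriz == matriz:
--             break
--         return executar_caida(nova_matriz)
--     return matriz
-- ===== SOURCE B (Python) =====
-- def executar_caida(matriz):
--     # One pass over the rows collects, per column, the falling items ("X"/"H") and the
--     # row of the first one; each column's rest state is then written directly: items
--     # stacked at the bottom (order preserved), "O" from the first item down to the stack,
--     # everything above the first item untouched.
--     n = len(matriz)
--     colunas = len(matriz[0])
--     itens = [[] for _ in range(colunas)]
--     topo = [n] * colunas
--     for i in range(n):
--         linha = matriz[i]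
--         if "X" in linha or "H" in linha:
--             for j in range(colunas):
--                 v = linha[j]
--                 if v == "X" or v == "H":
--                     if topo[j] == n:
--                         topo[j] = i
--                     itens[j].append(v)
--     resultado = [linha[:] for linha in matriz]
--     for j in range(colunas):
--         k = len(itens[j])
--         if k == 0:
--             continue
--         for i in range(topo[j], n - k):
--             resultado[i][j] = "O"
--         for t in range(k):
--             resultado[n - k + t][j] = itens[j][t]
--     return resultado
-- ===== Notes on version B (the rewrite author's own statement) =====
-- stated objective: faster
-- what changed: A repeatedly re-scans and copies the whole grid, moving every item down one row per pass, until a pass changes nothing; B computes the final rest state directly: one pass over the rows collects each column's items and first-item row (skipping item-free rows with a fast membership test), then each column is written once (items stacked at the bottom, 'O' filling the vacated region). Intended as faster (one scan instead of a pass per fall step); the in-episode a timing run read ~1.49x end-to-end at the largest generated size, below its 1.5 confirmation threshold.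
import Mathlib
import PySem

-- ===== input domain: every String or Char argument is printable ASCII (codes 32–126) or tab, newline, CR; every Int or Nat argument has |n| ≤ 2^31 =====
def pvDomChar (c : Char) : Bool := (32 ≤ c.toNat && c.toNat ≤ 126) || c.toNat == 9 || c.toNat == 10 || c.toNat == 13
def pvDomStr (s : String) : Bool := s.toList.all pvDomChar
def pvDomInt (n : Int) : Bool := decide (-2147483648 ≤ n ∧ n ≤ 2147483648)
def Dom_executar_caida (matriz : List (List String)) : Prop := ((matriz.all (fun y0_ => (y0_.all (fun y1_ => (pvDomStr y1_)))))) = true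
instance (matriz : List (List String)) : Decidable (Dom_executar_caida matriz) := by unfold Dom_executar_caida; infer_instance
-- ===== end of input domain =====

-- B replaces A's repeated full-grid passes (one row of fall per pass, until a pass changes
-- nothing) by one row scan that collects each column's items plus one write per column,
-- intended as faster (it retires the pass-until-stable loop); the in-episode timing run
-- read B ~1.5x at the largest generated size (just under its 1.5 confirmation threshold).
-- Equivalence is proved on Pre_ (exactly the inputs where Python A returns, no IndexError).

-- ===== PORT A =====
-- membership test `s in ["X", "H"]`
def pvItem (s : String) : Bool := s == "X" || s == "H"

-- helpers for the termination measure of `executar_caida` (cited by its decreasing_by)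
def pvPotRow (r : List String) : Nat := (r.filter pvItem).length

def pvPotM : List (List String) → Nat
  | [] => 0
  | r :: rs => pvPotRow r * rs.length + pvPotM rs

-- one body of A's inner loop: the guarded swap at rows (i-1, i), column j
def pvCairStep (nv : List (List String)) (i j : Nat) : List (List String) :=
  if !pvItem ((nv.getD i []).getD j "") && pvItem ((nv.getD (i-1) []).getD j "") then
    let nv1 := nv.set i ((nv.getD i []).set j ((nv.getD (i-1) []).getD j ""))
    nv1.set (i-1) ((nv1.getD (i-1) []).set j "O")
  else nv

-- `cair`: for i in range(linhas-1, 0, -1): for j in range(colunas): …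
-- (range(linhas-1, 0, -1) = [linhas-1, …, 1] = (List.range' 1 (linhas-1)).reverse)
def pvCair (m : List (List String)) : List (List String) :=
  let linhas := m.length
  let colunas := (m.headD []).length
  ((List.range' 1 (linhas - 1)).reverse).foldl
    (fun nv i => (List.range colunas).foldl (fun nv j => pvCairStep nv i j) nv) m

theorem pvPotRow_set (r : List String) (j : Nat) (v : String) (hj : j < r.length) :
    pvPotRow (r.set j v) + (if pvItem (r.getD j "") then 1 else 0)
      = pvPotRow r + (if pvItem v then 1 else 0) := by
  induction r generalizing j with
  | nil => simp at hj
  | cons a t ih =>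
    cases j with
    | zero =>
      simp only [List.set_cons_zero, pvPotRow, List.filter_cons, List.getD_cons_zero]
      by_cases hv : pvItem v <;> by_cases ha : pvItem a <;> simp [hv, ha]
    | succ j =>
      have hj' : j < t.length := by simpa using hj
      have := ih j hj'
      simp only [List.set_cons_succ, pvPotRow, List.filter_cons, List.getD_cons_succ] at *
      by_cases ha : pvItem a <;> simp [ha] at * <;> omega

theorem pvPotM_set (M : List (List String)) (i : Nat) (r' : List String) (hi : i < M.length) :
    pvPotM (M.set i r') + pvPotRow (M.getD i []) * (M.length - 1 - i)
      = pvPotM M + pvPotRow r' * (M.length - 1 - i) := by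
  induction M generalizing i with
  | nil => simp at hi
  | cons r rs ih =>
    cases i with
    | zero =>
      simp only [List.set_cons_zero, pvPotM, List.getD_cons_zero, List.length_cons,
        Nat.add_sub_cancel, Nat.sub_zero]
      omega
    | succ i =>
      have hi' : i < rs.length := by simpa using hi
      have := ih i hi'
      simp only [List.set_cons_succ, pvPotM, List.getD_cons_succ, List.length_cons,
        List.length_set, Nat.succ_sub_succ] at *
      rw [show rs.length - 0 - (i+1) = rs.length - 1 - i from by omega] at *
      omega

theorem pvItem_getD_lt {L : List (List String)} {a b : Nat}
    (h : pvItem ((L.getD a []).getD b "") = true) :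
    a < L.length ∧ b < (L.getD a []).length := by
  have hb : b < (L.getD a []).length := by
    by_contra hc
    rw [List.getD_eq_default] at h
    · exact absurd h (by decide)
    · omega
  have ha : a < L.length := by
    by_contra hc
    rw [List.getD_eq_default] at hb
    · simp at hb
    · omega
  exact ⟨ha, hb⟩

theorem pvCairStep_length (nv : List (List String)) (i j : Nat) :
    (pvCairStep nv i j).length = nv.length := by
  unfold pvCairStep; split <;> simp

theorem pv_getD_set_ne {α : Type} (l : List α) (i k : Nat) (a : α) {d : α} (h : k ≠ i) :
    (l.set i a).getD k d = l.getD k d := by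
  rw [List.getD_eq_getElem?_getD, List.getD_eq_getElem?_getD, List.getElem?_set]
  rw [if_neg (by omega : ¬ i = k)]

theorem pvCairStep_dec (nv : List (List String)) (i j : Nat) (hi : i < nv.length) :
    pvCairStep nv i j = nv ∨ pvPotM (pvCairStep nv i j) < pvPotM nv := by
  unfold pvCairStep
  split
  case isFalse => exact Or.inl rfl
  case isTrue h =>
  right
  dsimp only
  rw [Bool.and_eq_true, Bool.not_eq_true'] at h
  have hcur : pvItem ((nv.getD i []).getD j "") = false := h.1
  have habv : pvItem ((nv.getD (i-1) []).getD j "") = true := h.2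
  obtain ⟨h1, h2⟩ := pvItem_getD_lt habv
  have hipos : 1 ≤ i := by
    rcases Nat.eq_zero_or_pos i with h0 | h0
    · subst h0
      rw [Nat.zero_sub] at habv
      exact absurd (hcur.symm.trans habv) (by decide)
    · exact h0
  set ri := nv.getD i [] with hri
  set ri1 := nv.getD (i-1) [] with hri1
  set abv := ri1.getD j "" with habvdef
  set nv1 := nv.set i (ri.set j abv) with hnv1
  have hnv1len : nv1.length = nv.length := by simp [hnv1]
  have hget : nv1.getD (i-1) [] = ri1 := by
    rw [hnv1, hri1]; exact pv_getD_set_ne _ _ _ _ (by omega)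
  rw [hget]
  have e1 := pvPotM_set nv i (ri.set j abv) hi
  rw [← hri, ← hnv1] at e1
  have e2 := pvPotM_set nv1 (i-1) (ri1.set j "O") (by omega)
  rw [hget, hnv1len] at e2
  have pr1 : pvPotRow (ri1.set j "O") + 1 = pvPotRow ri1 := by
    have hx := pvPotRow_set ri1 j "O" h2
    rw [← habvdef, habv] at hx
    simpa using hx
  have pr2 : pvPotRow (ri.set j abv) ≤ pvPotRow ri + 1 := by
    by_cases hj : j < ri.length
    · have hx := pvPotRow_set ri j abv hj
      simp [habv] at hx
      omega
    · rw [List.set_eq_of_length_le (by omega)]; omega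
  have hww : nv.length - 1 - (i-1) = (nv.length - 1 - i) + 1 := by omega
  rw [hww] at e2
  rw [show pvPotRow ri1 * ((nv.length - 1 - i) + 1)
        = pvPotRow (ri1.set j "O") * ((nv.length - 1 - i) + 1) + ((nv.length - 1 - i) + 1)
      from by rw [← pr1]; ring] at e2
  have exp2 : pvPotRow (ri.set j abv) * (nv.length - 1 - i)
      ≤ pvPotRow ri * (nv.length - 1 - i) + (nv.length - 1 - i) := by
    calc pvPotRow (ri.set j abv) * (nv.length - 1 - i)
        ≤ (pvPotRow ri + 1) * (nv.length - 1 - i) := Nat.mul_le_mul_right _ pr2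
      _ = pvPotRow ri * (nv.length - 1 - i) + (nv.length - 1 - i) := by ring
  omega

theorem pv_foldl_dec {β : Type} (f : List (List String) → β → List (List String)) (l : List β)
    (n : Nat)
    (hlen : ∀ x b, b ∈ l → x.length = n → (f x b).length = n)
    (h : ∀ x b, b ∈ l → x.length = n → (f x b = x ∨ pvPotM (f x b) < pvPotM x)) :
    ∀ x, x.length = n →
      (l.foldl f x).length = n ∧ (l.foldl f x = x ∨ pvPotM (l.foldl f x) < pvPotM x) := by
  induction l with
  | nil => intro x hx; exact ⟨hx, Or.inl rfl⟩
  | cons b t ih =>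
    intro x hx
    have hfb : (f x b).length = n := hlen x b (by simp) hx
    obtain ⟨hl, hd⟩ := ih (fun x c hc => hlen x c (by simp [hc]))
      (fun x c hc => h x c (by simp [hc])) (f x b) hfb
    rw [List.foldl_cons]
    refine ⟨hl, ?_⟩
    rcases h x b (by simp) hx with h1 | h1
    · rw [h1] at hd ⊢; exact hd
    · rcases hd with h2 | h2
      · rw [h2]; exact Or.inr h1
      · exact Or.inr (h2.trans h1)

theorem pvInner_dec (i cols : Nat) (x : List (List String)) (hi : i < x.length) :
    ((List.range cols).foldl (fun nv j => pvCairStep nv i j) x).length = x.length ∧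
    ((List.range cols).foldl (fun nv j => pvCairStep nv i j) x = x ∨
      pvPotM ((List.range cols).foldl (fun nv j => pvCairStep nv i j) x) < pvPotM x) :=
  pv_foldl_dec _ _ x.length
    (fun y j _ hy => by rw [pvCairStep_length]; exact hy)
    (fun y j _ hy => pvCairStep_dec y i j (by omega)) x rfl

theorem pvCair_len_dec (m : List (List String)) :
    (pvCair m).length = m.length ∧
    (pvCair m = m ∨ pvPotM (pvCair m) < pvPotM m) := by
  unfold pvCair
  refine pv_foldl_dec _ _ m.length
    (fun x b hb hx => ?_) (fun x b hb hx => ?_) m rfl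
  · rw [← hx]; exact (pvInner_dec b _ x (by
      have := List.mem_range'.mp (List.mem_reverse.mp hb); omega)).1
  · exact (pvInner_dec b _ x (by
      have := List.mem_range'.mp (List.mem_reverse.mp hb); omega)).2

theorem pvCair_dec (m : List (List String)) (h : pvCair m ≠ m) :
    pvPotM (pvCair m) < pvPotM m := ((pvCair_len_dec m).2).resolve_left h

def executar_caida (matriz : List (List String)) : List (List String) :=
  let nova_matriz := pvCair matriz
  if nova_matriz = matriz then matriz
  else executar_caida nova_matriz
termination_by pvPotM matriz
decreasing_by exact pvCair_dec matriz (by assumption)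

-- ===== PORT B =====
-- resultado[i][j] = v (a no-op when the indices are out of range, like Python under Pre_)
def pvSetCell (M : List (List String)) (i j : Nat) (v : String) : List (List String) :=
  M.set i ((M.getD i []).set j v)

-- B phase 1: one pass over the rows collecting, per column, the items and the first item row
def pvAltScan (matriz : List (List String)) (colunas : Nat) :
    List (List String) × List Nat :=
  (List.range matriz.length).foldl (fun st i =>
    let linha := matriz.getD i []
    if linha.contains "X" || linha.contains "H" then
      (List.range colunas).foldl (fun st j =>
        let v := linha.getD j ""
        if pvItem v then
          (st.1.set j (st.1.getD j [] ++ [v]),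
           if st.2.getD j 0 = matriz.length then st.2.set j i else st.2)
        else st) st
    else st)
    (List.replicate colunas [], List.replicate colunas matriz.length)

-- B phase 2: write one column's rest state into the result
def pvAltCol (n : Nat) (itens : List (List String)) (topo : List Nat)
    (res : List (List String)) (j : Nat) : List (List String) :=
  let k := (itens.getD j []).length
  if k = 0 then res
  else
    let res1 := (List.range' (topo.getD j 0) (n - k - topo.getD j 0)).foldl
      (fun r i => pvSetCell r i j "O") res
    (List.range k).foldl
      (fun r t => pvSetCell r (n - k + t) j ((itens.getD j []).getD t "")) res1

def executar_caida_alt (matriz : List (List String)) : List (List String) :=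
  let n := matriz.length
  let colunas := (matriz.headD []).length
  let st := pvAltScan matriz colunas
  (List.range colunas).foldl (pvAltCol n st.1 st.2) matriz

-- ===== PRECONDITION & SPEC =====
-- Pre_ = exactly the inputs where the Python A returns: a nonempty matrix whose every row is
-- at least as long as row 0 (otherwise len(matriz[0]) / matriz[i][j] raises IndexError).
def Pre_executar_caida (matriz : List (List String)) : Prop :=
  matriz ≠ [] ∧ ∀ r ∈ matriz, (matriz.headD []).length ≤ r.length
instance (matriz : List (List String)) : Decidable (Pre_executar_caida matriz) := by
  unfold Pre_executar_caida; infer_instance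

def pvWitness_executar_caida : List (List String) := [["X", "O"], ["a", "H"], ["O", "b"]]

def Spec_executar_caida (matriz : List (List String)) (out : List (List String)) : Prop :=
  out = executar_caida_alt matriz
instance (matriz : List (List String)) (out : List (List String)) :
    Decidable (Spec_executar_caida matriz out) := by unfold Spec_executar_caida; infer_instance

-- ===== CLAIM (what is proved, stated in full; the proofs are below) =====
def Claim_equal_executar_caida : Prop := ∀ (matriz : List (List String)),
  Dom_executar_caida matriz → Pre_executar_caida matriz →
  Spec_executar_caida matriz (executar_caida matriz)

-- ===== LEMMAS AND PROOFS =====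

-- entry (i, j) of a matrix ("" when out of range)
def pvE (M : List (List String)) (i j : Nat) : String := (M.getD i []).getD j ""

-- column j of m, top to bottom
def pvCol (m : List (List String)) (j : Nat) : List String := m.map (fun r => r.getD j "")

-- one bottom-up pass of falling over a single column (top of the column first)
def pvPass : List String → List String
  | [] => []
  | a :: rest =>
    match pvPass rest with
    | [] => [a]
    | b :: rs => if !pvItem b && pvItem a then "O" :: a :: rs else a :: b :: rs

-- the rest state of a column: untouched prefix, "O" gap, items stacked at the bottom
def pvSettle (c : List String) : List String :=
  c.takeWhile (fun s => !pvItem s)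
    ++ List.replicate (c.length - (c.takeWhile (fun s => !pvItem s)).length
        - (c.filter pvItem).length) "O"
    ++ c.filter pvItem

-- ---- column-level lemmas about pvPass and pvSettle ----

theorem pvPass_cons_nil {rest : List String} (a : String) (hp : pvPass rest = []) :
    pvPass (a :: rest) = [a] := by
  unfold pvPass; rw [hp]

theorem pvPass_cons {rest : List String} (a b : String) (rs : List String)
    (hp : pvPass rest = b :: rs) :
    pvPass (a :: rest) =
      if !pvItem b && pvItem a then "O" :: a :: rs else a :: b :: rs := by
  unfold pvPass; rw [hp]

theorem pv_cond_iff (a b : String) :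
    (!pvItem b && pvItem a) = true ↔ (pvItem b = false ∧ pvItem a = true) := by
  simp [Bool.and_eq_true]

@[simp] theorem pvItem_O : pvItem "O" = false := rfl

theorem pvPass_length (c : List String) : (pvPass c).length = c.length := by
  induction c with
  | nil => rfl
  | cons a rest ih =>
    cases hp : pvPass rest with
    | nil => rw [hp] at ih; rw [pvPass_cons_nil a hp]; simp [← ih]
    | cons b rs =>
      rw [hp] at ih
      rw [pvPass_cons a b rs hp]
      split <;> simp_all

theorem pvPass_filter (c : List String) : (pvPass c).filter pvItem = c.filter pvItem := by
  induction c with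
  | nil => rfl
  | cons a rest ih =>
    cases hp : pvPass rest with
    | nil =>
      rw [hp] at ih
      rw [pvPass_cons_nil a hp]
      simp only [List.filter_cons, List.filter_nil] at *
      rw [← ih]
    | cons b rs =>
      rw [hp] at ih
      rw [pvPass_cons a b rs hp]
      split
      case isTrue h =>
        rw [pv_cond_iff] at h
        simp only [List.filter_cons, ← ih, h.1, h.2]
        simp
      case isFalse h =>
        simp only [List.filter_cons, ← ih]

theorem pvPass_short (c : List String) (h : c.length ≤ 1) : pvPass c = c := by
  match c, h with
  | [], _ => rfl
  | [a], _ => rfl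

theorem pvPass_fix_shape (c : List String) (h : pvPass c = c) :
    c = c.takeWhile (fun s => !pvItem s) ++ c.filter pvItem := by
  induction c with
  | nil => rfl
  | cons a rest ih =>
    cases hp : pvPass rest with
    | nil =>
      rw [pvPass_cons_nil a hp] at h
      have hr : rest = [] := by
        have := congrArg List.length h; simp at this; omega
      subst hr
      by_cases ha : pvItem a <;> simp [List.takeWhile, List.filter, ha]
    | cons b rs =>
      rw [pvPass_cons a b rs hp] at h
      split at h
      case isTrue hc =>
        rw [pv_cond_iff] at hc
        have : a = "O" := (List.cons_eq_cons.mp h).1.symm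
        rw [this] at hc
        exact absurd hc.2 (by decide)
      case isFalse hc =>
        have hrest : rest = b :: rs := (List.cons_eq_cons.mp h).2.symm
        have hfix : pvPass rest = rest := by rw [hp, hrest]
        have ihs := ih hfix
        by_cases ha : pvItem a
        · have hb : pvItem b = true := by
            by_contra hb
            exact hc (pv_cond_iff a b |>.mpr ⟨Bool.not_eq_true _ ▸ (by simpa using hb), ha⟩)
          have hrf : rest = rest.filter pvItem := by
            rw [hrest] at ihs ⊢
            rw [List.takeWhile_cons_of_neg (by simp [hb])] at ihs
            simpa using ihs
          rw [List.takeWhile_cons_of_neg (by simp [ha]), List.filter_cons_of_pos (by simp [ha])]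
          simpa using hrf
        · have ha' : pvItem a = false := by simpa using ha
          rw [List.takeWhile_cons_of_pos (by simp [ha']), List.filter_cons_of_neg (by simp [ha'])]
          simpa using ihs

theorem pv_pre_filter_len (c : List String) :
    (c.takeWhile (fun s => !pvItem s)).length + (c.filter pvItem).length ≤ c.length := by
  induction c with
  | nil => simp
  | cons a rest ih =>
    by_cases ha : pvItem a
    · rw [List.takeWhile_cons_of_neg (by simp [ha]), List.filter_cons_of_pos (by simp [ha])]
      simp; omega
    · have ha' : pvItem a = false := by simpa using ha
      rw [List.takeWhile_cons_of_pos (by simp [ha']), List.filter_cons_of_neg (by simp [ha'])]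
      simp; omega

theorem pvSettle_fix (c : List String) (h : pvPass c = c) : pvSettle c = c := by
  have hs := pvPass_fix_shape c h
  have hlen : c.length
      = (c.takeWhile (fun s => !pvItem s)).length + (c.filter pvItem).length := by
    conv_lhs => rw [hs]
    simp
  unfold pvSettle
  rw [show c.length - (c.takeWhile (fun s => !pvItem s)).length - (c.filter pvItem).length = 0
    from by omega]
  simpa using hs.symm

theorem pvSettle_cons_nonitem (a : String) (x : List String) (h : pvItem a = false) :
    pvSettle (a :: x) = a :: pvSettle x := by
  unfold pvSettle
  rw [List.takeWhile_cons_of_pos (by simp [h]), List.filter_cons_of_neg (by simp [h])]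
  simp

theorem pvSettle_cons_item (a : String) (x : List String) (h : pvItem a = true) :
    pvSettle (a :: x) = List.replicate (x.length - (x.filter pvItem).length) "O"
      ++ a :: x.filter pvItem := by
  unfold pvSettle
  rw [List.takeWhile_cons_of_neg (by simp [h]), List.filter_cons_of_pos (by simp [h])]
  simp [Nat.succ_sub_succ]

theorem pvSettle_pass (c : List String) : pvSettle (pvPass c) = pvSettle c := by
  induction c with
  | nil => rfl
  | cons a rest ih =>
    cases hp : pvPass rest with
    | nil =>
      have hr : rest = [] := by
        have := congrArg List.length hp
        rw [pvPass_length] at this; simpa using this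
      subst hr; rfl
    | cons b rs =>
      have hlen : rest.length = rs.length + 1 := by
        have := congrArg List.length hp
        rw [pvPass_length] at this
        simp at this; omega
      have hfl : rest.filter pvItem = (b :: rs).filter pvItem := by
        rw [← hp, pvPass_filter]
      rw [pvPass_cons a b rs hp]
      split
      case isTrue hc =>
        rw [pv_cond_iff] at hc
        rw [pvSettle_cons_nonitem _ _ (by decide), pvSettle_cons_item _ _ hc.2,
          pvSettle_cons_item _ _ hc.2]
        rw [List.filter_cons_of_neg (by simp [hc.1])] at hfl
        rw [hfl, hlen]
        have hk : (rs.filter pvItem).length ≤ rs.length := List.length_filter_le _ _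
        rw [show rs.length + 1 - (rs.filter pvItem).length
          = (rs.length - (rs.filter pvItem).length) + 1 from by omega]
        simp [List.replicate_succ]
      case isFalse hc =>
        by_cases ha : pvItem a
        · rw [pvSettle_cons_item _ _ ha, pvSettle_cons_item _ _ ha, hfl, hlen]
          simp
        · have ha' : pvItem a = false := by simpa using ha
          rw [pvSettle_cons_nonitem _ _ ha', pvSettle_cons_nonitem _ _ ha', ← hp, ih]

theorem pvSettle_length (c : List String) : (pvSettle c).length = c.length := by
  have := pv_pre_filter_len c
  unfold pvSettle
  simp; omega

theorem pvSettle_noitem (c : List String) (h : c.filter pvItem = []) : pvSettle c = c := by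
  have hall : ∀ x ∈ c, (fun s => !pvItem s) x = true := by
    intro x hx
    have := List.filter_eq_nil_iff.mp h x hx
    simpa using this
  unfold pvSettle
  rw [List.takeWhile_eq_self_iff.mpr hall, h]
  simp

-- ---- entry-level (pvE) machinery ----

theorem pv_getD_set_self {α : Type} (l : List α) (i : Nat) (a : α) {d : α} (hi : i < l.length) :
    (l.set i a).getD i d = a := by
  rw [List.getD_eq_getElem _ _ (by simpa using hi)]
  simp [List.getElem_set_self]

theorem pvCol_length (m : List (List String)) (j : Nat) : (pvCol m j).length = m.length := by
  simp [pvCol]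

theorem pvCol_getD (m : List (List String)) (j i : Nat) :
    (pvCol m j).getD i "" = pvE m i j := by
  by_cases h : i < m.length
  · rw [List.getD_eq_getElem _ _ (show i < (pvCol m j).length by rw [pvCol_length]; omega)]
    unfold pvCol pvE
    rw [List.getD_eq_getElem _ _ h]
    simp
  · rw [List.getD_eq_default _ _ (show (pvCol m j).length ≤ i by rw [pvCol_length]; omega)]
    unfold pvE
    rw [show m.getD i [] = [] from List.getD_eq_default _ _ (by omega)]
    rfl

theorem pv_list_ext_getD {A B : List String} (hlen : A.length = B.length)
    (h : ∀ i, A.getD i "" = B.getD i "") : A = B := by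
  apply List.ext_getElem hlen
  intro i h1 h2
  have hh := h i
  rwa [List.getD_eq_getElem _ _ h1, List.getD_eq_getElem _ _ h2] at hh

theorem pv_mat_ext {M N : List (List String)} (hlen : M.length = N.length)
    (hrow : ∀ i, (M.getD i []).length = (N.getD i []).length)
    (hE : ∀ i j, pvE M i j = pvE N i j) : M = N := by
  apply List.ext_getElem hlen
  intro i h1 h2
  apply List.ext_getElem
  · have hh := hrow i
    rwa [List.getD_eq_getElem _ _ h1, List.getD_eq_getElem _ _ h2] at hh
  · intro j hj1 hj2
    have hh := hE i j
    unfold pvE at hh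
    rwa [List.getD_eq_getElem _ _ h1, List.getD_eq_getElem _ _ h2,
         List.getD_eq_getElem _ _ hj1, List.getD_eq_getElem _ _ hj2] at hh

-- shape agreement: same number of rows, same row lengths
def pvShape (M N : List (List String)) : Prop :=
  M.length = N.length ∧ ∀ i, (M.getD i []).length = (N.getD i []).length

theorem pvShape_refl (M : List (List String)) : pvShape M M := ⟨rfl, fun _ => rfl⟩

theorem pvShape_trans {M N K : List (List String)} (h1 : pvShape M N) (h2 : pvShape N K) :
    pvShape M K := ⟨h1.1.trans h2.1, fun i => (h1.2 i).trans (h2.2 i)⟩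

theorem pvSetCell_shape (M : List (List String)) (i j : Nat) (v : String) :
    pvShape (pvSetCell M i j v) M := by
  constructor
  · simp [pvSetCell]
  · intro i'
    unfold pvSetCell
    by_cases h : i' = i
    · subst h
      by_cases hi : i' < M.length
      · rw [pv_getD_set_self _ _ _ hi]; simp
      · rw [List.set_eq_of_length_le (by omega)]
    · rw [pv_getD_set_ne _ _ _ _ h]

theorem pvE_setCell (M : List (List String)) (i j : Nat) (v : String) (i' j' : Nat) :
    pvE (pvSetCell M i j v) i' j' =
      if i' = i ∧ j' = j ∧ i < M.length ∧ j < (M.getD i []).length then v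
      else pvE M i' j' := by
  unfold pvSetCell pvE
  by_cases hi' : i' = i
  · subst hi'
    by_cases hi : i' < M.length
    · rw [pv_getD_set_self _ _ _ hi]
      by_cases hj' : j' = j
      · subst hj'
        by_cases hj : j' < (M.getD i' []).length
        · rw [pv_getD_set_self _ _ _ hj, if_pos ⟨rfl, rfl, hi, hj⟩]
        · rw [List.set_eq_of_length_le (by omega), if_neg (by tauto)]
      · rw [pv_getD_set_ne _ _ _ _ hj', if_neg (by tauto)]
    · rw [List.set_eq_of_length_le (by omega), if_neg (by tauto)]
  · rw [pv_getD_set_ne _ _ _ _ hi', if_neg (by tauto)]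

-- ---- characterization of pvCair: one guarded swap per column at rows (s-1, s) ----

@[simp] theorem pvE_def (M : List (List String)) (i j : Nat) :
    (M.getD i []).getD j "" = pvE M i j := rfl

-- the effect of A's inner loop body on one column
def pvPairUpd (c : List String) (s : Nat) : List String :=
  if !pvItem (c.getD s "") && pvItem (c.getD (s-1) "") then
    (c.set s (c.getD (s-1) "")).set (s-1) "O"
  else c

theorem pvCairStep_setCell (nv : List (List String)) (i j : Nat) :
    pvCairStep nv i j =
      if !pvItem ((nv.getD i []).getD j "") && pvItem ((nv.getD (i-1) []).getD j "") then
        pvSetCell (pvSetCell nv i j ((nv.getD (i-1) []).getD j "")) (i-1) j "O"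
      else nv := rfl

theorem pvInner_char (M : List (List String)) (s cols : Nat)
    (hs1 : 1 ≤ s) (hs : s < M.length)
    (hr1 : cols ≤ (M.getD s []).length) (hr2 : cols ≤ (M.getD (s-1) []).length) :
    ∀ t, t ≤ cols →
      pvShape ((List.range t).foldl (fun nv j => pvCairStep nv s j) M) M ∧
      (∀ i j, pvE ((List.range t).foldl (fun nv j => pvCairStep nv s j) M) i j =
        if j < t then (pvPairUpd (pvCol M j) s).getD i "" else pvE M i j) := by
  intro t
  induction t with
  | zero => intro _; exact ⟨pvShape_refl M, by simp⟩
  | succ t ih =>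
    intro ht
    obtain ⟨ihS, ihE⟩ := ih (by omega)
    set F := (List.range t).foldl (fun nv j => pvCairStep nv s j) M with hF
    have hfold : (List.range (t+1)).foldl (fun nv j => pvCairStep nv s j) M
        = pvCairStep F s t := by
      rw [List.range_succ, List.foldl_append]
      rfl
    have hcur : pvE F s t = pvE M s t := by rw [ihE]; simp
    have habv : pvE F (s-1) t = pvE M (s-1) t := by rw [ihE]; simp
    have hFlen : F.length = M.length := ihS.1
    have hFrow1 : (F.getD s []).length = (M.getD s []).length := ihS.2 s
    rw [hfold, pvCairStep_setCell]
    simp only [pvE_def]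
    rw [hcur, habv]
    by_cases hc : (!pvItem (pvE M s t) && pvItem (pvE M (s-1) t)) = true
    · rw [if_pos hc]
      have hlen1 : (pvSetCell F s t (pvE M (s-1) t)).length = M.length := by
        rw [(pvSetCell_shape F s t _).1, hFlen]
      have hrow1 : ((pvSetCell F s t (pvE M (s-1) t)).getD (s-1) []).length
          = (M.getD (s-1) []).length := by
        rw [(pvSetCell_shape F s t _).2 (s-1), ihS.2 (s-1)]
      have hupd : pvPairUpd (pvCol M t) s
          = ((pvCol M t).set s (pvE M (s-1) t)).set (s-1) "O" := by
        unfold pvPairUpd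
        rw [pvCol_getD, pvCol_getD, if_pos hc]
      refine ⟨pvShape_trans (pvSetCell_shape _ _ _ _)
        (pvShape_trans (pvSetCell_shape _ _ _ _) ihS), ?_⟩
      intro i j
      rw [pvE_setCell, pvE_setCell]
      by_cases hj : j = t
      · subst hj
        rw [if_pos (Nat.lt_succ_self _), hupd]
        by_cases hi1 : i = s - 1
        · subst hi1
          rw [if_pos ⟨rfl, rfl, by omega, by rw [hrow1]; omega⟩]
          rw [pv_getD_set_self _ _ _ (by rw [List.length_set, pvCol_length]; omega)]
        · rw [if_neg (by tauto)]
          by_cases hi2 : i = s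
          · subst hi2
            rw [if_pos ⟨rfl, rfl, by omega, by rw [hFrow1]; omega⟩]
            rw [pv_getD_set_ne _ _ _ _ (by omega),
              pv_getD_set_self _ _ _ (by rw [pvCol_length]; omega)]
          · rw [if_neg (by tauto), ihE, if_neg (by omega)]
            rw [pv_getD_set_ne _ _ _ _ (by omega), pv_getD_set_ne _ _ _ _ (by omega),
              pvCol_getD]
      · rw [if_neg (by tauto), if_neg (by tauto), ihE]
        by_cases hjt : j < t
        · rw [if_pos hjt, if_pos (by omega)]
        · rw [if_neg hjt, if_neg (by omega)]
    · rw [if_neg hc]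
      refine ⟨ihS, ?_⟩
      intro i j
      rw [ihE]
      by_cases hj : j = t
      · subst hj
        have hupd : pvPairUpd (pvCol M j) s = pvCol M j := by
          unfold pvPairUpd
          rw [pvCol_getD, pvCol_getD, if_neg hc]
        rw [if_neg (by omega : ¬ j < j), if_pos (by omega : j < j + 1), hupd, pvCol_getD]
      · by_cases hjt : j < t
        · rw [if_pos hjt, if_pos (by omega)]
        · rw [if_neg hjt, if_neg (by omega)]

-- partially fallen column: rows above s-1 untouched, the pass applied from row s-1 down
def pvPcol (m : List (List String)) (j s : Nat) : List String :=
  ((pvCol m j).take (s-1)) ++ pvPass ((pvCol m j).drop (s-1))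

theorem pvPcol_length (m : List (List String)) (j s : Nat) :
    (pvPcol m j s).length = m.length := by
  unfold pvPcol
  rw [List.length_append, pvPass_length, List.length_take, List.length_drop, pvCol_length]
  omega

theorem pvPairUpd_pcol (c : List String) (s : Nat) (hs1 : 1 ≤ s) (hs : s < c.length) :
    pvPairUpd (c.take s ++ pvPass (c.drop s)) s = c.take (s-1) ++ pvPass (c.drop (s-1)) := by
  obtain ⟨b, rs, hbrs⟩ : ∃ b rs, pvPass (c.drop s) = b :: rs := by
    cases hp : pvPass (c.drop s) with
    | nil =>
      have := congrArg List.length hp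
      rw [pvPass_length, List.length_drop] at this
      simp at this; omega
    | cons b rs => exact ⟨b, rs, rfl⟩
  have htl : (c.take s).length = s := by rw [List.length_take]; omega
  have hread1 : (c.take s ++ b :: rs).getD s "" = b := by
    rw [List.getD_eq_getElem _ _ (by rw [List.length_append, htl]; simp)]
    rw [List.getElem_append_right (by omega)]
    simp [htl]
  have hread2 : (c.take s ++ b :: rs).getD (s-1) "" = c.getD (s-1) "" := by
    rw [List.getD_eq_getElem _ _ (by rw [List.length_append, htl]; omega)]
    rw [List.getElem_append_left (by omega)]
    rw [List.getElem_take, List.getD_eq_getElem _ _ (by omega)]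
  set a := c.getD (s-1) "" with ha
  have hdrop : c.drop (s-1) = a :: c.drop s := by
    have h0 := List.drop_eq_getElem_cons (l := c) (i := s-1) (by omega)
    rw [show (s-1)+1 = s from by omega] at h0
    rw [h0, ha, List.getD_eq_getElem _ _ (by omega)]
  have hpass2 : pvPass (c.drop (s-1)) =
      if !pvItem b && pvItem a then "O" :: a :: rs
      else a :: b :: rs := by
    rw [hdrop]
    exact pvPass_cons _ _ _ hbrs
  have htakes : c.take s = c.take (s-1) ++ [a] := by
    rw [ha, List.getD_eq_getElem _ _ (by omega)]
    conv_lhs => rw [show s = (s-1)+1 by omega]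
    rw [List.take_add_one, List.getElem?_eq_getElem (by omega)]
    rfl
  unfold pvPairUpd
  rw [hbrs, hread1, hread2, hpass2]
  by_cases hcnd : (!pvItem b && pvItem a) = true
  · rw [if_pos hcnd, if_pos hcnd, htakes]
    rw [List.append_assoc]
    rw [List.set_append_right _ _ (by rw [List.length_take]; omega)]
    rw [List.length_take, show s - min (s-1) c.length = 1 from by omega]
    rw [List.set_append_right _ _ (by rw [List.length_take]; omega)]
    rw [List.length_take, show s - 1 - min (s-1) c.length = 0 from by omega]
    rfl
  · rw [if_neg hcnd, if_neg hcnd, htakes]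
    simp

theorem pvOuter_char (m : List (List String))
    (H : ∀ i, i < m.length → (m.headD []).length ≤ (m.getD i []).length) :
    ∀ k, k ≤ m.length - 1 →
      pvShape (((List.range' (m.length - k) k).reverse).foldl
        (fun nv i => (List.range (m.headD []).length).foldl
          (fun nv j => pvCairStep nv i j) nv) m) m ∧
      (∀ i j, pvE (((List.range' (m.length - k) k).reverse).foldl
        (fun nv i => (List.range (m.headD []).length).foldl
          (fun nv j => pvCairStep nv i j) nv) m) i j =
        if j < (m.headD []).length then (pvPcol m j (m.length - k)).getD i "" else pvE m i j) := by
  intro k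
  induction k with
  | zero =>
    intro _
    simp only [List.range'_zero, List.reverse_nil, List.foldl_nil]
    refine ⟨pvShape_refl m, ?_⟩
    intro i j
    have hpc : pvPcol m j (m.length - 0) = pvCol m j := by
      unfold pvPcol
      rw [pvPass_short _ (by rw [List.length_drop, pvCol_length]; omega)]
      exact List.take_append_drop _ _
    rw [hpc]
    by_cases hj : j < (m.headD []).length
    · rw [if_pos hj, pvCol_getD]
    · rw [if_neg hj]
  | succ k ih =>
    intro hk
    obtain ⟨ihS, ihE⟩ := ih (by omega)
    have hs1 : 1 ≤ m.length - k - 1 := by omega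
    set s := m.length - k - 1 with hsdef
    have hlist : (List.range' (m.length - (k+1)) (k+1)).reverse
        = (List.range' (m.length - k) k).reverse ++ [s] := by
      rw [show m.length - (k+1) = s from by omega, List.range'_succ, List.reverse_cons,
        show s + 1 = m.length - k from by omega]
    rw [hlist, List.foldl_append]
    simp only [List.foldl_cons, List.foldl_nil]
    set F := ((List.range' (m.length - k) k).reverse).foldl
      (fun nv i => (List.range (m.headD []).length).foldl (fun nv j => pvCairStep nv i j) nv) m
      with hFdef
    have hFlen : F.length = m.length := ihS.1
    obtain ⟨innS, innE⟩ := pvInner_char F s (m.headD []).length hs1 (by omega)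
      (by rw [ihS.2 s]; exact H s (by omega))
      (by rw [ihS.2 (s-1)]; exact H (s-1) (by omega))
      (m.headD []).length (le_refl _)
    have hcolF : ∀ j, j < (m.headD []).length → pvCol F j = pvPcol m j (s+1) := by
      intro j hj
      apply pv_list_ext_getD
      · rw [pvCol_length, hFlen, pvPcol_length]
      · intro i
        rw [pvCol_getD, ihE, if_pos hj, show m.length - k = s + 1 from by omega]
    refine ⟨pvShape_trans innS ihS, ?_⟩
    intro i j
    rw [innE]
    by_cases hj : j < (m.headD []).length
    · rw [if_pos hj, if_pos hj, hcolF j hj]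
      have hpc : pvPairUpd (pvPcol m j (s+1)) s = pvPcol m j s := by
        have := pvPairUpd_pcol (pvCol m j) s hs1 (by rw [pvCol_length]; omega)
        unfold pvPcol
        rw [show s + 1 - 1 = s from by omega]
        exact this
      rw [hpc, show m.length - (k+1) = s from by omega]
    · rw [if_neg hj, if_neg hj, ihE, if_neg hj]

theorem pvCair_char (m : List (List String))
    (H : ∀ i, i < m.length → (m.headD []).length ≤ (m.getD i []).length) :
    pvShape (pvCair m) m ∧
    (∀ i j, pvE (pvCair m) i j =
      if j < (m.headD []).length then (pvPass (pvCol m j)).getD i "" else pvE m i j) := by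
  have h := pvOuter_char m H (m.length - 1) (le_refl _)
  have hrange : m.length - (m.length - 1) = min 1 m.length := by omega
  have hco : pvCair m = ((List.range' (m.length - (m.length - 1)) (m.length - 1)).reverse).foldl
      (fun nv i => (List.range (m.headD []).length).foldl (fun nv j => pvCairStep nv i j) nv) m := by
    unfold pvCair
    cases m with
    | nil => rfl
    | cons r rs => rw [show (r :: rs).length - ((r :: rs).length - 1) = 1 from by simp]
  rw [hco] at *
  refine ⟨h.1, ?_⟩
  intro i j
  rw [h.2 i j]
  by_cases hj : j < (m.headD []).length
  · rw [if_pos hj, if_pos hj]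
    have : pvPcol m j (m.length - (m.length - 1)) = pvPass (pvCol m j) := by
      unfold pvPcol
      rw [show m.length - (m.length - 1) - 1 = 0 from by omega]
      simp
    rw [this]
  · rw [if_neg hj, if_neg hj]

theorem pv_headD_getD (l : List (List String)) : l.headD [] = l.getD 0 [] := by
  cases l <;> rfl

theorem executar_caida_char : ∀ (m : List (List String)),
    (∀ i, i < m.length → (m.headD []).length ≤ (m.getD i []).length) →
    pvShape (executar_caida m) m ∧
    (∀ i j, pvE (executar_caida m) i j =
      if j < (m.headD []).length then (pvSettle (pvCol m j)).getD i "" else pvE m i j) := by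
  intro m
  induction m using executar_caida.induct with
  | case1 m nova heq =>
    intro H
    rw [show nova = pvCair m from rfl] at heq
    have hrun : executar_caida m = m := by
      unfold executar_caida
      rw [if_pos heq]
    rw [hrun]
    refine ⟨pvShape_refl m, ?_⟩
    intro i j
    by_cases hj : j < (m.headD []).length
    · rw [if_pos hj]
      have hpc : pvPass (pvCol m j) = pvCol m j := by
        apply pv_list_ext_getD
        · rw [pvPass_length]
        · intro i'
          have := (pvCair_char m H).2 i' j
          rw [heq, if_pos hj] at this
          rw [← this, pvCol_getD]
      rw [pvSettle_fix _ hpc, pvCol_getD]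
    · rw [if_neg hj]
  | case2 m nova hne ih =>
    intro H
    rw [show nova = pvCair m from rfl] at hne ih
    have hchar := pvCair_char m H
    have hcols : ((pvCair m).headD []).length = (m.headD []).length := by
      rw [pv_headD_getD, pv_headD_getD]
      exact hchar.1.2 0
    have H' : ∀ i, i < (pvCair m).length →
        ((pvCair m).headD []).length ≤ ((pvCair m).getD i []).length := by
      intro i hi
      rw [hcols, hchar.1.2 i]
      exact H i (by rw [← hchar.1.1]; omega)
    have ihc := ih H'
    have hrun : executar_caida m = executar_caida (pvCair m) := by
      conv_lhs => unfold executar_caida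
      rw [if_neg hne]
    rw [hrun]
    refine ⟨pvShape_trans ihc.1 hchar.1, ?_⟩
    intro i j
    rw [ihc.2 i j, hcols]
    by_cases hj : j < (m.headD []).length
    · rw [if_pos hj, if_pos hj]
      have hpc : pvCol (pvCair m) j = pvPass (pvCol m j) := by
        apply pv_list_ext_getD
        · rw [pvCol_length, pvPass_length, pvCol_length, hchar.1.1]
        · intro i'
          rw [pvCol_getD, hchar.2 i' j, if_pos hj]
      rw [hpc, pvSettle_pass]
    · rw [if_neg hj, if_neg hj, hchar.2 i j, if_neg hj]

-- ---- B-side helper lemmas ----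

theorem pv_getD_replicate {α : Type} (k j : Nat) (x d : α) (h : j < k) :
    (List.replicate k x).getD j d = x := by
  rw [List.getD_eq_getElem _ _ (by simpa using h)]
  exact List.getElem_replicate _

theorem pv_take_succ_getD (c : List String) (r : Nat) (h : r < c.length) :
    c.take (r+1) = c.take r ++ [c.getD r ""] := by
  rw [List.take_add_one, List.getElem?_eq_getElem h, List.getD_eq_getElem _ _ h]
  rfl

theorem pv_filter_append_item (xs : List String) (v : String) (h : pvItem v = true) :
    (xs ++ [v]).filter pvItem = xs.filter pvItem ++ [v] := by
  rw [List.filter_append]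
  simp [h]

theorem pv_filter_append_nonitem (xs : List String) (v : String) (h : pvItem v = false) :
    (xs ++ [v]).filter pvItem = xs.filter pvItem := by
  rw [List.filter_append]
  simp [h]

theorem pv_takeWhile_append_ne (xs ys : List String) (h : xs.filter pvItem ≠ []) :
    (xs ++ ys).takeWhile (fun s => !pvItem s) = xs.takeWhile (fun s => !pvItem s) := by
  induction xs with
  | nil => exact absurd rfl h
  | cons a t ih =>
    by_cases ha : pvItem a
    · rw [List.cons_append, List.takeWhile_cons_of_neg (by simp [ha]),
        List.takeWhile_cons_of_neg (by simp [ha])]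
    · have ha' : pvItem a = false := by simpa using ha
      rw [List.filter_cons_of_neg (by simp [ha'])] at h
      rw [List.cons_append, List.takeWhile_cons_of_pos (by simp [ha']),
        List.takeWhile_cons_of_pos (by simp [ha']), ih h]

theorem pv_takeWhile_append_all (xs ys : List String)
    (h : xs.filter pvItem = []) :
    (xs ++ ys).takeWhile (fun s => !pvItem s) = xs ++ ys.takeWhile (fun s => !pvItem s) := by
  induction xs with
  | nil => rfl
  | cons a t ih =>
    by_cases ha : pvItem a
    · rw [List.filter_cons_of_pos (by simp [ha])] at h
      exact absurd h (by simp)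
    · have ha' : pvItem a = false := by simpa using ha
      rw [List.filter_cons_of_neg (by simp [ha'])] at h
      rw [List.cons_append, List.takeWhile_cons_of_pos (by simp [ha']), ih h]
      rfl

-- ---- B phase 1 characterization ----

-- let-free views of the two loop bodies of pvAltScan (definitionally equal to them)
def pvScanCell (m : List (List String)) (i : Nat)
    (st : List (List String) × List Nat) (j : Nat) : List (List String) × List Nat :=
  if pvItem ((m.getD i []).getD j "") then
    (st.1.set j (st.1.getD j [] ++ [(m.getD i []).getD j ""]),
     if st.2.getD j 0 = m.length then st.2.set j i else st.2)
  else st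

def pvScanRow (m : List (List String)) (colunas : Nat)
    (st : List (List String) × List Nat) (i : Nat) : List (List String) × List Nat :=
  if (m.getD i []).contains "X" || (m.getD i []).contains "H" then
    (List.range colunas).foldl (pvScanCell m i) st
  else st

theorem pvAltScan_eq (m : List (List String)) (colunas : Nat) :
    pvAltScan m colunas = (List.range m.length).foldl (pvScanRow m colunas)
      (List.replicate colunas [], List.replicate colunas m.length) := rfl

-- accumulator values for a processed column prefix
def pvItensVal (m : List (List String)) (j r : Nat) : List String :=
  ((pvCol m j).take r).filter pvItem

def pvTopoVal (m : List (List String)) (j r : Nat) : Nat :=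
  if ((pvCol m j).take r).filter pvItem = [] then m.length
  else (((pvCol m j).take r).takeWhile (fun s => !pvItem s)).length

theorem pvTopoVal_lt (m : List (List String)) (j r : Nat) (hr : r < m.length)
    (hf : ((pvCol m j).take r).filter pvItem ≠ []) :
    pvTopoVal m j r < m.length := by
  unfold pvTopoVal
  rw [if_neg hf]
  have h1 : ((List.take r (pvCol m j)).takeWhile (fun s => !pvItem s)).length
      ≤ (List.take r (pvCol m j)).length := (List.takeWhile_prefix _).length_le
  have h2 : ((pvCol m j).take r).length ≤ r := by
    rw [List.length_take]; omega
  omega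

-- extending a column prefix by a NON-item changes neither accumulator value
theorem pv_keep_nonitem (m : List (List String)) (j r : Nat)
    (hr : r < m.length) (hv : pvItem ((pvCol m j).getD r "") = false) :
    pvItensVal m j (r+1) = pvItensVal m j r ∧ pvTopoVal m j (r+1) = pvTopoVal m j r := by
  have htake : (pvCol m j).take (r+1) = (pvCol m j).take r ++ [(pvCol m j).getD r ""] :=
    pv_take_succ_getD _ _ (by rw [pvCol_length]; omega)
  unfold pvItensVal pvTopoVal
  rw [htake, pv_filter_append_nonitem _ _ hv]
  refine ⟨rfl, ?_⟩
  by_cases hf : ((pvCol m j).take r).filter pvItem = []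
  · rw [if_pos hf, if_pos hf]
  · rw [if_neg hf, if_neg hf, pv_takeWhile_append_ne _ _ hf]

-- extending a column prefix by an item
theorem pv_keep_item (m : List (List String)) (j r : Nat)
    (hr : r < m.length) (hv : pvItem ((pvCol m j).getD r "") = true) :
    pvItensVal m j (r+1) = pvItensVal m j r ++ [(pvCol m j).getD r ""] ∧
    pvTopoVal m j (r+1) = (if ((pvCol m j).take r).filter pvItem = [] then r
      else pvTopoVal m j r) := by
  have htake : (pvCol m j).take (r+1) = (pvCol m j).take r ++ [(pvCol m j).getD r ""] :=
    pv_take_succ_getD _ _ (by rw [pvCol_length]; omega)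
  unfold pvItensVal pvTopoVal
  rw [htake, pv_filter_append_item _ _ hv]
  refine ⟨rfl, ?_⟩
  rw [if_neg (by simp)]
  by_cases hf : ((pvCol m j).take r).filter pvItem = []
  · rw [if_pos hf, pv_takeWhile_append_all _ _ hf,
      List.takeWhile_cons_of_neg (by simpa using hv), List.append_nil,
      List.length_take, pvCol_length]
    omega
  · rw [if_neg hf, if_neg hf, pv_takeWhile_append_ne _ _ hf]

theorem pvScanCell_char (m : List (List String)) (i : Nat)
    (st : List (List String) × List Nat) (colunas : Nat)
    (h1 : st.1.length = colunas) (h2 : st.2.length = colunas) :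
    ∀ t, t ≤ colunas →
      ((List.range t).foldl (pvScanCell m i) st).1.length = colunas ∧
      ((List.range t).foldl (pvScanCell m i) st).2.length = colunas ∧
      (∀ j, j < colunas →
        ((List.range t).foldl (pvScanCell m i) st).1.getD j []
          = (if j < t then pvScanCell m i st j |>.1.getD j [] else st.1.getD j []) ∧
        ((List.range t).foldl (pvScanCell m i) st).2.getD j 0
          = (if j < t then pvScanCell m i st j |>.2.getD j 0 else st.2.getD j 0)) := by
  intro t
  induction t with
  | zero =>
    intro _
    rw [List.range_zero, List.foldl_nil]
    exact ⟨h1, h2, fun j _ => ⟨by rw [if_neg (by omega)], by rw [if_neg (by omega)]⟩⟩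
  | succ t ih =>
    intro ht
    obtain ⟨b1, b2, bE⟩ := ih (by omega)
    rw [List.range_succ, List.foldl_append, List.foldl_cons, List.foldl_nil]
    set G := (List.range t).foldl (pvScanCell m i) st with hG
    have hGt1 : G.1.getD t [] = st.1.getD t [] := by
      have := (bE t (by omega)).1; rwa [if_neg (by omega)] at this
    have hGt2 : G.2.getD t 0 = st.2.getD t 0 := by
      have := (bE t (by omega)).2; rwa [if_neg (by omega)] at this
    have hlen1 : (pvScanCell m i G t).1.length = colunas := by
      unfold pvScanCell; split
      · simpa using b1
      · exact b1
    have hlen2 : (pvScanCell m i G t).2.length = colunas := by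
      unfold pvScanCell; split
      · dsimp only; split <;> simpa using b2
      · exact b2
    refine ⟨hlen1, hlen2, ?_⟩
    intro j hj
    by_cases hjt : j = t
    · subst hjt
      constructor
      · rw [if_pos (by omega)]
        unfold pvScanCell
        by_cases hv : pvItem ((m.getD i []).getD j "")
        · rw [if_pos hv, if_pos hv]
          dsimp only
          rw [pv_getD_set_self _ _ _ (by rw [b1]; omega),
              pv_getD_set_self _ _ _ (by rw [h1]; omega), hGt1]
        · rw [if_neg hv, if_neg hv]
          exact hGt1
      · rw [if_pos (by omega)]
        unfold pvScanCell
        by_cases hv : pvItem ((m.getD i []).getD j "")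
        · rw [if_pos hv, if_pos hv]
          dsimp only
          rw [hGt2]
          by_cases hc : st.2.getD j 0 = m.length
          · rw [if_pos hc, if_pos hc,
                pv_getD_set_self _ _ _ (by rw [b2]; omega),
                pv_getD_set_self _ _ _ (by rw [h2]; omega)]
          · rw [if_neg hc, if_neg hc, hGt2]
        · rw [if_neg hv, if_neg hv]
          exact hGt2
    · have hne1 : (pvScanCell m i G t).1.getD j [] = G.1.getD j [] := by
        unfold pvScanCell; split
        · exact pv_getD_set_ne _ _ _ _ hjt
        · rfl
      have hne2 : (pvScanCell m i G t).2.getD j 0 = G.2.getD j 0 := by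
        unfold pvScanCell; split
        · dsimp only; split
          · exact pv_getD_set_ne _ _ _ _ hjt
          · rfl
        · rfl
      have hbj := bE j hj
      constructor
      · rw [hne1, hbj.1]
        by_cases hjt' : j < t
        · rw [if_pos hjt', if_pos (by omega)]
        · rw [if_neg hjt', if_neg (by omega)]
      · rw [hne2, hbj.2]
        by_cases hjt' : j < t
        · rw [if_pos hjt', if_pos (by omega)]
        · rw [if_neg hjt', if_neg (by omega)]

theorem pvAltScan_char (m : List (List String)) (colunas : Nat)
    (H : ∀ i, i < m.length → colunas ≤ (m.getD i []).length) :
    (pvAltScan m colunas).1.length = colunas ∧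
    (pvAltScan m colunas).2.length = colunas ∧
    (∀ j, j < colunas →
      (pvAltScan m colunas).1.getD j [] = pvItensVal m j m.length ∧
      (pvAltScan m colunas).2.getD j 0 = pvTopoVal m j m.length) := by
  rw [pvAltScan_eq]
  suffices h : ∀ r, r ≤ m.length →
      ((List.range r).foldl (pvScanRow m colunas)
        (List.replicate colunas [], List.replicate colunas m.length)).1.length = colunas ∧
      ((List.range r).foldl (pvScanRow m colunas)
        (List.replicate colunas [], List.replicate colunas m.length)).2.length = colunas ∧
      (∀ j, j < colunas →
        ((List.range r).foldl (pvScanRow m colunas)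
          (List.replicate colunas [], List.replicate colunas m.length)).1.getD j []
            = pvItensVal m j r ∧
        ((List.range r).foldl (pvScanRow m colunas)
          (List.replicate colunas [], List.replicate colunas m.length)).2.getD j 0
            = pvTopoVal m j r) from
    h m.length (le_refl _)
  intro r
  induction r with
  | zero =>
    intro _
    rw [List.range_zero, List.foldl_nil]
    refine ⟨by simp, by simp, ?_⟩
    intro j hj
    unfold pvItensVal pvTopoVal
    rw [List.take_zero, List.filter_nil]
    exact ⟨pv_getD_replicate _ _ _ _ hj, by rw [pv_getD_replicate _ _ _ _ hj]; simp⟩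
  | succ r ih =>
    intro hr
    obtain ⟨ih1, ih2, ihE⟩ := ih (by omega)
    rw [List.range_succ, List.foldl_append, List.foldl_cons, List.foldl_nil]
    set st := (List.range r).foldl (pvScanRow m colunas)
      (List.replicate colunas [], List.replicate colunas m.length) with hst
    have hrow : ∀ j, (m.getD r []).getD j "" = (pvCol m j).getD r "" := by
      intro j
      rw [pvCol_getD]
      rfl
    unfold pvScanRow
    split
    case isTrue hguard =>
      obtain ⟨a1, a2, aE⟩ := pvScanCell_char m r st colunas ih1 ih2 colunas (le_refl _)
      refine ⟨a1, a2, ?_⟩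
      intro j hj
      have haj := aE j hj
      rw [if_pos hj, if_pos hj] at haj
      obtain ⟨haj1, haj2⟩ := haj
      by_cases hv : pvItem ((m.getD r []).getD j "")
      · have hvc : pvItem ((pvCol m j).getD r "") = true := by rw [← hrow j]; exact hv
        obtain ⟨hki, hkt⟩ := pv_keep_item m j r (by omega) hvc
        constructor
        · rw [haj1]
          unfold pvScanCell
          rw [if_pos hv]
          dsimp only
          rw [pv_getD_set_self _ _ _ (by rw [ih1]; omega), (ihE j hj).1, hki, ← hrow j]
        · rw [haj2]
          unfold pvScanCell
          rw [if_pos hv]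
          dsimp only
          rw [hkt]
          by_cases hf : ((pvCol m j).take r).filter pvItem = []
          · rw [if_pos hf]
            have hm : st.2.getD j 0 = m.length := by
              rw [(ihE j hj).2]; unfold pvTopoVal; rw [if_pos hf]
            rw [if_pos hm, pv_getD_set_self _ _ _ (by rw [ih2]; omega)]
          · rw [if_neg hf]
            have hm : ¬ st.2.getD j 0 = m.length := by
              rw [(ihE j hj).2]
              have := pvTopoVal_lt m j r (by omega) hf
              omega
            rw [if_neg hm, (ihE j hj).2]
      · have hvc : pvItem ((pvCol m j).getD r "") = false := by
          rw [← hrow j]; simpa using hv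
        obtain ⟨hki, hkt⟩ := pv_keep_nonitem m j r (by omega) hvc
        constructor
        · rw [haj1]
          unfold pvScanCell
          rw [if_neg hv, (ihE j hj).1, hki]
        · rw [haj2]
          unfold pvScanCell
          rw [if_neg hv, (ihE j hj).2, hkt]
    case isFalse hguard =>
      refine ⟨ih1, ih2, ?_⟩
      intro j hj
      have hvc : pvItem ((pvCol m j).getD r "") = false := by
        rw [← hrow j]
        by_contra hx
        have hx' : pvItem ((m.getD r []).getD j "") = true := by simpa using hx
        have hor : (m.getD r []).getD j "" = "X" ∨ (m.getD r []).getD j "" = "H" := by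
          unfold pvItem at hx'
          rcases Bool.or_eq_true _ _ |>.mp hx' with h | h
          · exact Or.inl (by simpa using h)
          · exact Or.inr (by simpa using h)
        have hjlen : j < (m.getD r []).length := lt_of_lt_of_le hj (H r (by omega))
        have hmem : (m.getD r []).getD j "" ∈ m.getD r [] := by
          rw [List.getD_eq_getElem _ _ hjlen]
          exact List.getElem_mem _
        rcases hor with h | h
        · apply hguard
          rw [Bool.or_eq_true]
          left
          rw [← h]
          exact List.elem_iff.mpr hmem
        · apply hguard
          rw [Bool.or_eq_true]
          right
          rw [← h]
          exact List.elem_iff.mpr hmem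
      obtain ⟨hki, hkt⟩ := pv_keep_nonitem m j r (by omega) hvc
      exact ⟨by rw [(ihE j hj).1, hki], by rw [(ihE j hj).2, hkt]⟩

-- ---- B-side: the two write loops ----

theorem pv_fold_O_char (j : Nat) :
    ∀ (len : Nat) (M : List (List String)) (a : Nat),
      (∀ i', a ≤ i' → i' < a + len → i' < M.length ∧ j < (M.getD i' []).length) →
      pvShape ((List.range' a len).foldl (fun r i => pvSetCell r i j "O") M) M ∧
      (∀ i' j', pvE ((List.range' a len).foldl (fun r i => pvSetCell r i j "O") M) i' j' =
        if j' = j ∧ a ≤ i' ∧ i' < a + len then "O" else pvE M i' j') := by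
  intro len
  induction len with
  | zero =>
    intro M a _
    rw [List.range'_zero]
    exact ⟨pvShape_refl M, by intro i' j'; rw [List.foldl_nil, if_neg (by omega)]⟩
  | succ len ih =>
    intro M a hin
    rw [List.range'_succ, List.foldl_cons]
    obtain ⟨S, E⟩ := ih (pvSetCell M a j "O") (a+1) (by
      intro i' h1 h2
      rw [(pvSetCell_shape M a j "O").1, (pvSetCell_shape M a j "O").2 i']
      exact hin i' (by omega) (by omega))
    refine ⟨pvShape_trans S (pvSetCell_shape M a j "O"), ?_⟩
    intro i' j'
    rw [E i' j', pvE_setCell]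
    by_cases hj' : j' = j
    · subst hj'
      by_cases hi1 : a+1 ≤ i' ∧ i' < a+1+len
      · rw [if_pos ⟨rfl, hi1.1, hi1.2⟩, if_pos ⟨rfl, by omega, by omega⟩]
      · rw [if_neg (by simp; omega)]
        by_cases hi2 : i' = a
        · subst hi2
          rw [if_pos ⟨rfl, rfl, (hin i' (le_refl _) (by omega)).1,
            (hin i' (le_refl _) (by omega)).2⟩, if_pos ⟨rfl, le_refl _, by omega⟩]
        · rw [if_neg (by tauto), if_neg (by simp; omega)]
    · rw [if_neg (by tauto), if_neg (by tauto), if_neg (by tauto)]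

theorem pv_fold_items_char (j q : Nat) (g : Nat → String) :
    ∀ (k : Nat) (M : List (List String)),
      (∀ t, t < k → q + t < M.length ∧ j < (M.getD (q+t) []).length) →
      pvShape ((List.range k).foldl (fun r t => pvSetCell r (q+t) j (g t)) M) M ∧
      (∀ i' j', pvE ((List.range k).foldl (fun r t => pvSetCell r (q+t) j (g t)) M) i' j' =
        if j' = j ∧ q ≤ i' ∧ i' < q + k then g (i' - q) else pvE M i' j') := by
  intro k
  induction k with
  | zero =>
    intro M _
    rw [List.range_zero]
    exact ⟨pvShape_refl M, by intro i' j'; rw [List.foldl_nil, if_neg (by omega)]⟩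
  | succ k ih =>
    intro M hin
    rw [List.range_succ, List.foldl_append, List.foldl_cons, List.foldl_nil]
    obtain ⟨S, E⟩ := ih M (fun t ht => hin t (by omega))
    set F := (List.range k).foldl (fun r t => pvSetCell r (q+t) j (g t)) M with hF
    refine ⟨pvShape_trans (pvSetCell_shape F (q+k) j (g k)) S, ?_⟩
    intro i' j'
    rw [pvE_setCell, E i' j']
    by_cases hj' : j' = j
    · subst hj'
      by_cases hi1 : i' = q + k
      · subst hi1
        rw [if_pos ⟨rfl, rfl, by rw [S.1]; exact (hin k (by omega)).1,
            by rw [S.2 (q+k)]; exact (hin k (by omega)).2⟩]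
        rw [show q + k - q = k from by omega, if_pos ⟨rfl, by omega, by omega⟩]
      · rw [if_neg (by tauto)]
        by_cases hi2 : q ≤ i' ∧ i' < q + k
        · rw [if_pos ⟨rfl, hi2.1, hi2.2⟩, if_pos ⟨rfl, by omega, by omega⟩]
        · rw [if_neg (by simp; omega), if_neg (by simp; omega)]
    · rw [if_neg (by tauto), if_neg (by tauto), if_neg (by tauto)]

-- ---- B-side: indexing into pvSettle ----

theorem pvSettle_getD (c : List String) (i : Nat) :
    (pvSettle c).getD i "" =
      if i < (c.takeWhile (fun s => !pvItem s)).length then c.getD i ""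
      else if i < c.length - (c.filter pvItem).length then "O"
      else (c.filter pvItem).getD (i - (c.length - (c.filter pvItem).length)) "" := by
  have hpk := pv_pre_filter_len c
  have hkn : (c.filter pvItem).length ≤ c.length := List.length_filter_le _ _
  by_cases h1 : i < (c.takeWhile (fun s => !pvItem s)).length
  · rw [if_pos h1]
    rw [List.getD_eq_getElem _ _ (by rw [pvSettle_length]; omega),
      List.getD_eq_getElem _ _ (by omega)]
    unfold pvSettle
    rw [List.getElem_append_left (by
      simp only [List.length_append, List.length_replicate]; omega)]
    rw [List.getElem_append_left (by omega)]
    exact (List.takeWhile_prefix _).getElem h1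
  · rw [if_neg h1]
    by_cases h2 : i < c.length - (c.filter pvItem).length
    · rw [if_pos h2]
      rw [List.getD_eq_getElem _ _ (by rw [pvSettle_length]; omega)]
      unfold pvSettle
      rw [List.getElem_append_left (by
        simp only [List.length_append, List.length_replicate]; omega)]
      rw [List.getElem_append_right (by omega)]
      exact List.getElem_replicate _
    · rw [if_neg h2]
      by_cases h3 : i < c.length
      · rw [List.getD_eq_getElem _ _ (by rw [pvSettle_length]; omega)]
        unfold pvSettle
        rw [List.getElem_append_right (by
          simp only [List.length_append, List.length_replicate]; omega)]
        rw [List.getD_eq_getElem _ _ (by omega)]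
        congr 1
        simp only [List.length_append, List.length_replicate]
        omega
      · rw [List.getD_eq_default _ _ (by rw [pvSettle_length]; omega),
          List.getD_eq_default _ _ (by omega)]

theorem pvE_oob (M : List (List String)) (i j : Nat) (h : M.length ≤ i) :
    pvE M i j = "" := by
  unfold pvE
  rw [List.getD_eq_default _ _ h]
  rfl

theorem pvAltCol_char (m res : List (List String)) (itens : List (List String))
    (topo : List Nat) (t : Nat)
    (H : ∀ i, i < m.length → (m.headD []).length ≤ (m.getD i []).length)
    (ht : t < (m.headD []).length) (hS : pvShape res m)
    (hcol : ∀ i, pvE res i t = pvE m i t)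
    (hit : itens.getD t [] = pvItensVal m t m.length)
    (htp : topo.getD t 0 = pvTopoVal m t m.length) :
    pvShape (pvAltCol m.length itens topo res t) res ∧
    (∀ i j, pvE (pvAltCol m.length itens topo res t) i j =
      if j = t then (pvSettle (pvCol m t)).getD i "" else pvE res i j) := by
  have hclen : (pvCol m t).length = m.length := pvCol_length m t
  have htk : (pvCol m t).take m.length = pvCol m t := by
    rw [← pvCol_length m t]; exact List.take_length
  rw [pvItensVal, htk] at hit
  rw [pvTopoVal, htk] at htp
  have hpk := pv_pre_filter_len (pvCol m t)
  unfold pvAltCol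
  dsimp only
  rw [hit]
  by_cases hk0 : ((pvCol m t).filter pvItem).length = 0
  · rw [if_pos hk0]
    have hkf : (pvCol m t).filter pvItem = [] := List.length_eq_zero_iff.mp hk0
    refine ⟨pvShape_refl res, ?_⟩
    intro i j
    by_cases hj : j = t
    · subst hj
      rw [if_pos rfl, pvSettle_noitem _ hkf, pvCol_getD, hcol i]
    · rw [if_neg hj]
  · rw [if_neg hk0]
    have hf_ne : (pvCol m t).filter pvItem ≠ [] := by
      intro hc; rw [hc] at hk0; exact hk0 rfl
    rw [htp, if_neg hf_ne]
    set p := ((pvCol m t).takeWhile (fun s => !pvItem s)).length with hpdef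
    set k := ((pvCol m t).filter pvItem).length with hkdef
    obtain ⟨S1, E1⟩ := pv_fold_O_char t (m.length - k - p) res p
      (by
        intro i' h1 h2
        rw [hS.1, hS.2 i']
        constructor
        · omega
        · exact lt_of_lt_of_le ht (H i' (by omega)))
    set res1 := (List.range' p (m.length - k - p)).foldl (fun r i => pvSetCell r i t "O") res
      with hres1
    have hS1m : pvShape res1 m := pvShape_trans S1 hS
    obtain ⟨S2, E2⟩ := pv_fold_items_char t (m.length - k)
      (fun t' => ((pvCol m t).filter pvItem).getD t' "") k res1
      (by
        intro t' ht'
        rw [hS1m.1, hS1m.2 (m.length - k + t')]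
        constructor
        · omega
        · exact lt_of_lt_of_le ht (H _ (by omega)))
    refine ⟨pvShape_trans S2 S1, ?_⟩
    intro i j
    rw [E2 i j, E1 i j]
    by_cases hj : j = t
    · subst hj
      rw [if_pos rfl, pvSettle_getD, ← hkdef, ← hpdef]
      by_cases c1 : i < p
      · rw [if_pos c1,
            if_neg (show ¬(j = j ∧ m.length - k ≤ i ∧ i < m.length - k + k) from by
              simp; omega),
            if_neg (show ¬(j = j ∧ p ≤ i ∧ i < p + (m.length - k - p)) from by
              simp; omega),
            pvCol_getD, hcol i]
      · rw [if_neg c1]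
        by_cases c2 : i < m.length - k
        · rw [if_neg (show ¬(j = j ∧ m.length - k ≤ i ∧ i < m.length - k + k) from by
                simp; omega),
              if_pos (show j = j ∧ p ≤ i ∧ i < p + (m.length - k - p) from
                ⟨rfl, by omega, by omega⟩),
              if_pos (show i < (pvCol m j).length - k from by rw [hclen]; omega)]
        · rw [if_neg (show ¬ i < (pvCol m j).length - k from by rw [hclen]; omega)]
          by_cases c3 : i < m.length
          · rw [if_pos (show j = j ∧ m.length - k ≤ i ∧ i < m.length - k + k from
                ⟨rfl, by omega, by omega⟩)]
            rw [hclen]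
          · rw [if_neg (show ¬(j = j ∧ m.length - k ≤ i ∧ i < m.length - k + k) from by
                simp; omega),
              if_neg (show ¬(j = j ∧ p ≤ i ∧ i < p + (m.length - k - p)) from by
                simp; omega),
              hcol i, pvE_oob m _ _ (by omega),
              List.getD_eq_default _ _ (show ((pvCol m j).filter pvItem).length
                ≤ i - ((pvCol m j).length - k) from by rw [hclen, ← hkdef]; omega)]
    · rw [if_neg (by tauto), if_neg (by tauto), if_neg hj]

theorem executar_caida_alt_char (m : List (List String))
    (H : ∀ i, i < m.length → (m.headD []).length ≤ (m.getD i []).length) :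
    pvShape (executar_caida_alt m) m ∧
    (∀ i j, pvE (executar_caida_alt m) i j =
      if j < (m.headD []).length then (pvSettle (pvCol m j)).getD i "" else pvE m i j) := by
  obtain ⟨sc1, sc2, scE⟩ := pvAltScan_char m (m.headD []).length H
  have halt : executar_caida_alt m = (List.range (m.headD []).length).foldl
      (pvAltCol m.length (pvAltScan m (m.headD []).length).1
        (pvAltScan m (m.headD []).length).2) m := rfl
  rw [halt]
  suffices h : ∀ t, t ≤ (m.headD []).length →
      pvShape ((List.range t).foldl (pvAltCol m.length
        (pvAltScan m (m.headD []).length).1 (pvAltScan m (m.headD []).length).2) m) m ∧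
      (∀ i j, pvE ((List.range t).foldl (pvAltCol m.length
        (pvAltScan m (m.headD []).length).1 (pvAltScan m (m.headD []).length).2) m) i j =
        if j < t then (pvSettle (pvCol m j)).getD i "" else pvE m i j) from
    h (m.headD []).length (le_refl _)
  intro t
  induction t with
  | zero =>
    intro _
    rw [List.range_zero]
    exact ⟨pvShape_refl m, by intro i j; rw [List.foldl_nil, if_neg (by omega)]⟩
  | succ t ih =>
    intro ht
    obtain ⟨ihS, ihE⟩ := ih (by omega)
    rw [List.range_succ, List.foldl_append, List.foldl_cons, List.foldl_nil]
    set F := (List.range t).foldl (pvAltCol m.length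
      (pvAltScan m (m.headD []).length).1 (pvAltScan m (m.headD []).length).2) m with hF
    obtain ⟨S, E⟩ := pvAltCol_char m F (pvAltScan m (m.headD []).length).1
      (pvAltScan m (m.headD []).length).2 t H (by omega) ihS
      (by intro i; rw [ihE i t, if_neg (by omega)])
      (scE t (by omega)).1 (scE t (by omega)).2
    refine ⟨pvShape_trans S ihS, ?_⟩
    intro i j
    rw [E i j]
    by_cases hj : j = t
    · subst hj
      rw [if_pos rfl, if_pos (by omega)]
    · rw [if_neg hj, ihE i j]
      by_cases hjt : j < t
      · rw [if_pos hjt, if_pos (by omega)]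
      · rw [if_neg hjt, if_neg (by omega)]

-- ===== VERDICT (by name: the statement is the Claim_ definition above) =====
theorem executar_caida_spec : Claim_equal_executar_caida := by
  intro m hDom hPre
  unfold Spec_executar_caida
  obtain ⟨hne, hrows⟩ := hPre
  have H : ∀ i, i < m.length → (m.headD []).length ≤ (m.getD i []).length := by
    intro i hi
    apply hrows
    rw [List.getD_eq_getElem _ _ hi]
    exact List.getElem_mem _
  have hA := executar_caida_char m H
  have hB := executar_caida_alt_char m H
  apply pv_mat_ext
  · rw [hA.1.1, hB.1.1]
  · intro i
    rw [hA.1.2 i, hB.1.2 i]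
  · intro i j
    rw [hA.2 i j, hB.2 i j]
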